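-- pv_equiv track=rewrite | github.com/betson-fernando/laudo-pericial | MODELO HOMICÍDIO/Arquivos .TEX/Erros.py | countbrack
-- ===== SOURCE A (Python) =====
-- def countbrack(string: str) -> bool:
--     """Esta função conta as chaves de uma linha. Se alguma chave for aberta ou fechada erroneamente, retorna erro."""
--     cont = 0
--     for char in string:
--         if char == "{":
--             cont += 1
--         elif char == "}":
--             cont -= 1
--             if cont < 0:
--                 return False
--         elif char == "\n" and cont != 0:
--             return False
--     return True
-- ===== SOURCE B (Python) =====
-- def countbrack(string: str) -> bool:
--     lines = string.split('\n')
--     n = len(lines)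
--     for i, line in enumerate(lines):
--         cont = 0
--         for ch in line:
--             if ch == '{':
--                 cont += 1
--             elif ch == '}':
--                 cont -= 1
--                 if cont < 0:
--                     return False
--         if i < n - 1 and cont != 0:
--             return False
--     return True
-- ===== Notes on version B (the rewrite author's own statement) =====
-- stated objective: alternative
-- what changed: B first splits the string on newline characters and judges each line independently with a fresh counter (balance required for every line except the last, which only needs non-negativity), replacing A's single stateful scan with early returns at embedded newlines.
import Mathlib
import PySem

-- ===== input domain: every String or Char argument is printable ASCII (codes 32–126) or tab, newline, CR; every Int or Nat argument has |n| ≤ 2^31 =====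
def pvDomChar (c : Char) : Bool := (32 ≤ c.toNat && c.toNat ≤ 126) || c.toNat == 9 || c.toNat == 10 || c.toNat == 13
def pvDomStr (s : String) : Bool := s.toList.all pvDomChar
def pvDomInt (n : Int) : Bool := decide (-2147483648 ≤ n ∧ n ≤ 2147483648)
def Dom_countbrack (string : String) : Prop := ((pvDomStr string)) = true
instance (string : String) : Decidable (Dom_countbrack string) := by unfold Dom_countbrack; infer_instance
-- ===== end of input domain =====

-- B splits the string on '\n' and checks each line with a fresh counter (last line needs only non-negativity); same value as A's single stateful scan.

-- ===== PORT A =====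
-- A's for-loop over the characters with counter `cont` and early returns.
def countbrackLoop : List Char → Int → Bool
  | [], _ => true
  | c :: rest, cont =>
    if c = '{' then countbrackLoop rest (cont + 1)
    else if c = '}' then
      (if cont - 1 < 0 then false else countbrackLoop rest (cont - 1))
    else if c = '\n' ∧ cont ≠ 0 then false
    else countbrackLoop rest cont

def countbrack (string : String) : Bool :=
  countbrackLoop string.toList 0

-- ===== PORT B =====
-- Source B: string.split('\n')
def splitNl : List Char → List (List Char)
  | [] => [[]]
  | c :: rest =>
    if c = '\n' then [] :: splitNl rest
    else
      match splitNl rest with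
      | h :: t => (c :: h) :: t
      | [] => [[c]]

-- Source B inner loop: scan one line with a fresh counter; none = went negative (return False)
def scanLine : List Char → Int → Option Int
  | [], cont => some cont
  | c :: rest, cont =>
    if c = '{' then scanLine rest (cont + 1)
    else if c = '}' then
      (if cont - 1 < 0 then none else scanLine rest (cont - 1))
    else scanLine rest cont

-- Source B outer loop over the lines: every line but the last must end balanced at 0
def checkLines : List (List Char) → Bool
  | [] => true
  | [l] => (scanLine l 0).isSome
  | l :: rest => (scanLine l 0 == some 0) && checkLines rest

def countbrack_alt (string : String) : Bool :=
  checkLines (splitNl string.toList)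

-- ===== PRECONDITION & SPEC =====
def Spec_countbrack (string : String) (out : Bool) : Prop := out = countbrack_alt string
instance (string : String) (out : Bool) : Decidable (Spec_countbrack string out) := by unfold Spec_countbrack; infer_instance

-- ===== CLAIM (what is proved, stated in full; the proofs are below) =====
def Claim_equal_countbrack : Prop := ∀ (string : String), Dom_countbrack string → Spec_countbrack string (countbrack string)

-- ===== LEMMAS AND PROOFS =====

-- A's scan run with an arbitrary starting counter, phrased over the split lines
def checkLinesFrom : List (List Char) → Int → Bool
  | [], _ => true
  | [l], cont => (scanLine l cont).isSome
  | l :: rest, cont => (scanLine l cont == some 0) && checkLinesFrom rest 0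

theorem splitNl_ne_nil (cs : List Char) : splitNl cs ≠ [] := by
  induction cs with
  | nil => simp [splitNl]
  | cons c rest ih =>
    simp only [splitNl]
    split
    · simp
    · cases h : splitNl rest with
      | nil => simp
      | cons h' t => simp

theorem countbrackLoop_eq_checkLinesFrom (cs : List Char) (cont : Int) :
    countbrackLoop cs cont = checkLinesFrom (splitNl cs) cont := by
  induction cs generalizing cont with
  | nil => simp [countbrackLoop, splitNl, checkLinesFrom, scanLine]
  | cons c rest ih =>
    by_cases hbr : c = '{'
    · subst hbr
      rw [show countbrackLoop ('{' :: rest) cont = countbrackLoop rest (cont + 1) from rfl, ih]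
      simp only [splitNl]
      rw [if_neg (show ¬('{' = '\n') by decide)]
      cases h : splitNl rest with
      | nil => exact absurd h (splitNl_ne_nil rest)
      | cons h' t =>
        cases t with
        | nil => simp [checkLinesFrom, scanLine]
        | cons a b => simp [checkLinesFrom, scanLine]
    · by_cases hcl : c = '}'
      · subst hcl
        rw [show countbrackLoop ('}' :: rest) cont
              = (if cont - 1 < 0 then false else countbrackLoop rest (cont - 1)) from rfl]
        simp only [splitNl]
        rw [if_neg (show ¬('}' = '\n') by decide)]
        cases h : splitNl rest with
        | nil => exact absurd h (splitNl_ne_nil rest)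
        | cons h' t =>
          by_cases hneg : cont - 1 < 0
          · rw [if_pos hneg]
            cases t with
            | nil => simp [checkLinesFrom, scanLine, hneg]
            | cons a b => simp [checkLinesFrom, scanLine, hneg]
          · rw [if_neg hneg, ih]
            cases t with
            | nil => simp [checkLinesFrom, scanLine, hneg, h]
            | cons a b => simp [checkLinesFrom, scanLine, hneg, h]
      · by_cases hnl : c = '\n'
        · subst hnl
          rw [show splitNl ('\n' :: rest) = [] :: splitNl rest from by simp [splitNl]]
          by_cases hz : cont = 0
          · subst hz
            rw [show countbrackLoop ('\n' :: rest) 0 = countbrackLoop rest 0 from by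
                  simp [countbrackLoop], ih]
            cases h : splitNl rest with
            | nil => exact absurd h (splitNl_ne_nil rest)
            | cons h' t => simp [checkLinesFrom, scanLine]
          · rw [show countbrackLoop ('\n' :: rest) cont = false from by
                  simp [countbrackLoop, hz]]
            cases h : splitNl rest with
            | nil => exact absurd h (splitNl_ne_nil rest)
            | cons h' t => simp [checkLinesFrom, scanLine, hz]
        · rw [show countbrackLoop (c :: rest) cont
                = (if c = '{' then countbrackLoop rest (cont + 1)
                   else if c = '}' then (if cont - 1 < 0 then false else countbrackLoop rest (cont - 1))
                   else if c = '\n' ∧ cont ≠ 0 then false else countbrackLoop rest cont) from rfl,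
             if_neg hbr, if_neg hcl, if_neg (fun h => hnl h.1), ih]
          simp only [splitNl]
          rw [if_neg hnl]
          cases h : splitNl rest with
          | nil => exact absurd h (splitNl_ne_nil rest)
          | cons h' t =>
            cases t with
            | nil => simp [checkLinesFrom, scanLine, hbr, hcl]
            | cons a b => simp [checkLinesFrom, scanLine, hbr, hcl]

theorem checkLinesFrom_zero : ∀ (ls : List (List Char)), checkLinesFrom ls 0 = checkLines ls
  | [] => rfl
  | [_] => rfl
  | l :: a :: b => by
    rw [show checkLinesFrom (l :: a :: b) 0
          = ((scanLine l 0 == some 0) && checkLinesFrom (a :: b) 0) from rfl,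
        show checkLines (l :: a :: b)
          = ((scanLine l 0 == some 0) && checkLines (a :: b)) from rfl,
        checkLinesFrom_zero (a :: b)]

-- ===== VERDICT (by name: the statement is the Claim_ definition above) =====
theorem countbrack_spec : Claim_equal_countbrack := by
  intro s _
  unfold Spec_countbrack countbrack countbrack_alt
  rw [countbrackLoop_eq_checkLinesFrom, checkLinesFrom_zero]
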